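-- pv_equiv track=rewrite | github.com/andreasagap/NLP-Sentiment-Analysis-in-Greek-Tweets | Preprocessing/preprocessing.py | count_pos_neg_score
-- ===== SOURCE A (Python) =====
-- def count_pos_neg_score(words, positives, negatives):
--     pos = 0
--     neg = 0
--     for w in words:
--         if w in positives:
--             pos += 1
--         if w in negatives:
--             neg += 1
--
--     return pos, neg
-- ===== SOURCE B (Python) =====
-- def count_pos_neg_score(words, positives, negatives):
--     cnt = {}
--     for w in words:
--         cnt[w] = cnt.get(w, 0) + 1
--     pos = sum(cnt.get(w, 0) for w in set(positives))
--     neg = sum(cnt.get(w, 0) for w in set(negatives))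
--     return pos, neg
-- ===== Notes on version B (the rewrite author's own statement) =====
-- stated objective: alternative
-- what changed: B reverses the traversal: it tabulates word frequencies in a dict once and then sums the counts of the distinct positive/negative lexicon entries, instead of scanning both lexicon lists for every word.
import Mathlib
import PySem

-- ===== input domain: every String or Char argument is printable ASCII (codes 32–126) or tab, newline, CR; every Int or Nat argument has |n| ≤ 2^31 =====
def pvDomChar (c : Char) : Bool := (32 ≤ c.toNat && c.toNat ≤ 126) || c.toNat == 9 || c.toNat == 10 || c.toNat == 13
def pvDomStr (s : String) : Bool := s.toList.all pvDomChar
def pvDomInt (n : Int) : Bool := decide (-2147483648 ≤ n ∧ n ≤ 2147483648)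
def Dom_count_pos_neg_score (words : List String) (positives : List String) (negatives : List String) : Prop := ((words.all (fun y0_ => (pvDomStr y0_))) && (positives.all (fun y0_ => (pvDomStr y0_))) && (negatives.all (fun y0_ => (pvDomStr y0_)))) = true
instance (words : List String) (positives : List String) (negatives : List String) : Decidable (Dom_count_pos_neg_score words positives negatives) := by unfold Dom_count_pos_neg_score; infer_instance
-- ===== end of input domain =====

-- B builds a word-frequency dict once, then sums the counts of the distinct lexicon entries (objective: alternative decomposition).



-- ===== PORT A =====
-- the body of A's for-loop, as a step function
def pvStepA (positives negatives : List String) (s : Int × Int) (w : String) : Int × Int :=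
  let s1 := if positives.contains w then (s.1 + 1, s.2) else s
  if negatives.contains w then (s1.1, s1.2 + 1) else s1

def count_pos_neg_score (words : List String) (positives : List String) (negatives : List String) : Int × Int :=
  words.foldl (pvStepA positives negatives) (0, 0)

-- ===== PORT B =====
def count_pos_neg_score_alt (words : List String) (positives : List String) (negatives : List String) : Int × Int :=
  let cnt : PySem.Dict String Int :=
    words.foldl (fun d w => d.insert w (d.getD w 0 + 1)) PySem.Dict.empty
  let pos := ((PySem.Set.ofList positives).map (fun w => cnt.getD w 0)).sum
  let neg := ((PySem.Set.ofList negatives).map (fun w => cnt.getD w 0)).sum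
  (pos, neg)

-- ===== PRECONDITION & SPEC =====
def Spec_count_pos_neg_score (words : List String) (positives : List String) (negatives : List String) (out : Int × Int) : Prop := out = count_pos_neg_score_alt words positives negatives
instance (words : List String) (positives : List String) (negatives : List String) (out : Int × Int) : Decidable (Spec_count_pos_neg_score words positives negatives out) := by unfold Spec_count_pos_neg_score; infer_instance

-- ===== CLAIM (what is proved, stated in full; the proofs are below) =====
def Claim_equal_count_pos_neg_score : Prop := ∀ (words : List String) (positives : List String) (negatives : List String), Dom_count_pos_neg_score words positives negatives → Spec_count_pos_neg_score words positives negatives (count_pos_neg_score words positives negatives)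

-- ===== LEMMAS AND PROOFS =====

-- one step of A's loop, written additively
theorem pvStepA_eq (positives negatives : List String) (a b : Int) (w : String) :
    pvStepA positives negatives (a, b) w
      = (a + (if positives.contains w then (1 : Int) else 0),
         b + (if negatives.contains w then (1 : Int) else 0)) := by
  unfold pvStepA
  by_cases hp : w ∈ positives <;> by_cases hn : w ∈ negatives <;>
    simp [hp, hn]

-- A's fold, started from any accumulator, adds the two filter lengths.
theorem pvA_foldl (positives negatives : List String) :
    ∀ (ws : List String) (a b : Int),
      ws.foldl (pvStepA positives negatives) (a, b)
      = (a + ((ws.filter (fun w => positives.contains w)).length : Int),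
         b + ((ws.filter (fun w => negatives.contains w)).length : Int)) := by
  intro ws
  induction ws with
  | nil => intro a b; simp
  | cons w t ih =>
      intro a b
      rw [List.foldl_cons, pvStepA_eq, ih, List.filter_cons, List.filter_cons]
      by_cases hp : w ∈ positives <;> by_cases hn : w ∈ negatives <;>
        simp [hp, hn] <;> omega

-- For a duplicate-free list D, summing the indicator of equality with h over D is the membership indicator.
theorem pvSum_indicator (h : String) :
    ∀ (D : List String), D.Nodup →
      (D.map (fun w => if w = h then (1 : Int) else 0)).sum
        = if h ∈ D then (1 : Int) else 0 := by
  intro D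
  induction D with
  | nil => intro _; simp
  | cons d D ih =>
      intro hnd
      rcases List.nodup_cons.mp hnd with ⟨hdn, hD⟩
      rw [List.map_cons, List.sum_cons, ih hD]
      by_cases hdh : d = h
      · subst hdh; simp [hdn]
      · simp [hdh, Ne.symm hdh]

-- Summing words.count over a duplicate-free list D equals the length of words filtered by membership in D.
theorem pvSum_count (D : List String) (hD : D.Nodup) :
    ∀ (ws : List String),
      (D.map (fun w => ((ws.count w : Nat) : Int))).sum
        = ((ws.filter (fun x => D.contains x)).length : Int) := by
  intro ws
  induction ws with
  | nil => simp
  | cons h t ih =>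
      have hsplit :
          (D.map (fun w => ((( h :: t).count w : Nat) : Int))).sum
            = (D.map (fun w => ((t.count w : Nat) : Int))).sum
              + (D.map (fun w => if w = h then (1 : Int) else 0)).sum := by
        rw [← List.sum_map_add]
        apply congrArg List.sum
        apply List.map_congr_left
        intro w _
        by_cases hw : w = h
        · simp [hw]
        · simp [hw, Ne.symm hw]
      rw [hsplit, ih, pvSum_indicator h D hD, List.filter_cons]
      by_cases hh : h ∈ D <;> simp [hh]

-- B's dict fold is Counter(words); its getD is the count.
theorem pvCnt_getD (words : List String) (w : String) :
    (words.foldl (fun d x => d.insert x (d.getD x 0 + 1)) PySem.Dict.empty).getD w 0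
      = ((words.count w : Nat) : Int) := by
  rw [PySem.Dict.foldl_insert_getD_add_one_eq_counter]
  exact PySem.Dict.getD_counter words w

-- Filtering by membership in the dedup equals filtering by membership in the original list.
theorem pvFilter_ofList (ps : List String) (ws : List String) :
    ws.filter (fun x => List.contains (PySem.Set.ofList ps) x)
      = ws.filter (fun x => ps.contains x) := by
  apply List.filter_congr
  intro x _
  simp [List.contains_eq_mem, PySem.Set.mem_ofList]

theorem pvSide (words ps : List String) :
    ((PySem.Set.ofList ps).map
        (fun w => (words.foldl (fun d x => d.insert x (d.getD x 0 + 1)) PySem.Dict.empty).getD w 0)).sum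
      = ((words.filter (fun w => ps.contains w)).length : Int) := by
  have h1 : ((PySem.Set.ofList ps).map
        (fun w => (words.foldl (fun d x => d.insert x (d.getD x 0 + 1)) PySem.Dict.empty).getD w 0)).sum
      = ((PySem.Set.ofList ps).map (fun w => ((words.count w : Nat) : Int))).sum := by
    apply congrArg List.sum
    apply List.map_congr_left
    intro w _
    exact pvCnt_getD words w
  rw [h1, pvSum_count (PySem.Set.ofList ps) (PySem.Set.nodup_ofList ps) words,
      pvFilter_ofList ps words]

-- ===== VERDICT (by name: the statement is the Claim_ definition above) =====
theorem count_pos_neg_score_spec : Claim_equal_count_pos_neg_score := by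
  intro words positives negatives _
  unfold Spec_count_pos_neg_score count_pos_neg_score count_pos_neg_score_alt
  dsimp only
  rw [pvA_foldl positives negatives words 0 0, pvSide words positives, pvSide words negatives]
  simp
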